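-- pv_equiv track=rewrite | github.com/Sm2468/Sudoku | updates.py | update_clauses
-- ===== SOURCE A (Python) =====
-- def update_clauses(clauses, truthvalues):
--     changed = False
--     for clause in [*clauses]:
--         clause_not_removed = True
--         for literal in [*truthvalues]:
--
--             if (literal in clause) & clause_not_removed:
--                 # verwijder de clause waarin een waarde staat die al waar is.
--                 if truthvalues[literal]:
--                     changed = True
--                     clauses.remove(clause)
--                     clause_not_removed = False
--                 if -literal in clause:
--                     changed = True
--                     clause.remove(-literal)
--
--                 # verwijder een literal uit een clause waarvan je weet dat die niet waar is.
--                 if not truthvalues[literal]: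
--                     changed = True
--                     clause.remove(literal)
--
--                 if -literal in clause:
--                     changed = True
--                     clauses.remove(clause)
--                     clause_not_removed = False
--     return changed
-- ===== SOURCE B (Python) =====
-- def update_clauses(clauses, truthvalues):
--     # Return-value reimplementation: A's 'changed' flag is True exactly when some
--     # clause contains some assigned literal. (Unlike A, this does not mutate clauses.)
--     keys = set(truthvalues)
--     return any(not keys.isdisjoint(clause) for clause in clauses)
-- ===== Notes on version B (the rewrite author's own statement) =====
-- stated objective: faster
-- what changed: Instead of simulating A's destructive clause/literal removals, B observes that A's returned flag is set exactly when some clause contains some assigned literal, and computes that directly with one set-intersection pass (B does not mutate clauses; the equivalence is about the return value only).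
-- outside the precondition, e.g. on update_clauses([[0, 0]], {0: False}): A returns True, B returns True; on update_clauses([[1, 0, -2]], {1: True, 0: False, 2: True}): A returns True, B returns True
import Mathlib
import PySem

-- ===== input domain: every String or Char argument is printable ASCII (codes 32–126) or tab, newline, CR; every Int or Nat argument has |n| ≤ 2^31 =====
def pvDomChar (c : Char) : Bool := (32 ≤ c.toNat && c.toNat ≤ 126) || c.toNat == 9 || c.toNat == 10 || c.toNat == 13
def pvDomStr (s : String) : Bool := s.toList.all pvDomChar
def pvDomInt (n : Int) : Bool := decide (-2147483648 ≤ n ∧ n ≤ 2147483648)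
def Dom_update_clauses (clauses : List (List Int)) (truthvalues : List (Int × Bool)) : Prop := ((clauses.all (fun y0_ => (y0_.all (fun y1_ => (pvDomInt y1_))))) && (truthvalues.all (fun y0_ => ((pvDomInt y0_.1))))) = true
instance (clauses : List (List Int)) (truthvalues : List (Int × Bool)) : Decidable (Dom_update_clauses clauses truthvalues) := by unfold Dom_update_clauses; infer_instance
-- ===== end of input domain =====

-- B replaces A's triple loop of destructive removals by a single set-intersection pass
-- computing the same returned flag; A mutates `clauses` in place and B does not, so the
-- equivalence proved here is about the RETURN value only.

-- ===== PORT A =====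
-- A mutates Python objects in place; the port models the mutable state exactly:
-- each clause object is a pair (contents, present-in-`clauses`), in original order.
-- `clause.remove(x)` (ValueError → no-op; Pre_ excludes those inputs):
def pvRemoveLit (x : Int) (c : List Int) : List Int := (PySem.List.remove? c x).getD c

-- `clauses.remove(v)`: mark the first still-present object whose contents equal v
-- as removed (ValueError → no-op; Pre_ excludes those inputs).
def pvRemoveClause (v : List Int) : List (List Int × Bool) → List (List Int × Bool)
  | [] => []
  | (c, p) :: rest =>
      if p && c == v then (c, false) :: rest else (c, p) :: pvRemoveClause v rest

-- current contents of clause object number i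
def pvContent (s : List (List Int × Bool)) (i : Nat) : List Int :=
  ((s[i]?).map Prod.fst).getD []

-- in-place `clause.remove(x)` on object i
def pvMutate (i : Nat) (x : Int) (s : List (List Int × Bool)) : List (List Int × Bool) :=
  s.modify i (fun cp => (pvRemoveLit x cp.1, cp.2))

-- body of A's inner loop, one literal; state = (changed, objects, clause_not_removed)
def pvLit (tv : PySem.Dict Int Bool) (i : Nat)
    (st : Bool × List (List Int × Bool) × Bool) (l : Int) :
    Bool × List (List Int × Bool) × Bool :=
  let c0 := pvContent st.2.1 i
  if c0.contains l && st.2.2 then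
    let tvl := (tv.get? l).getD false          -- truthvalues[literal] (key always present)
    let st1 : Bool × List (List Int × Bool) × Bool :=
      if tvl then (true, pvRemoveClause c0 st.2.1, false) else st
    let c1 := pvContent st1.2.1 i
    let st2 : Bool × List (List Int × Bool) × Bool :=
      if c1.contains (-l) then (true, pvMutate i (-l) st1.2.1, st1.2.2) else st1
    let st3 : Bool × List (List Int × Bool) × Bool :=
      if !tvl then (true, pvMutate i l st2.2.1, st2.2.2) else st2
    let c3 := pvContent st3.2.1 i
    if c3.contains (-l) then (true, pvRemoveClause c3 st3.2.1, false) else st3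
  else st

def update_clauses (clauses : List (List Int)) (truthvalues : List (Int × Bool)) : Bool :=
  let tv := PySem.Dict.ofList truthvalues
  let keys := tv.keys                          -- [*truthvalues]
  let final := (List.range clauses.length).foldl
    (fun (acc : Bool × List (List Int × Bool)) i =>
      let r := keys.foldl (pvLit tv i) (acc.1, acc.2, true)
      (r.1, r.2.1))
    (false, clauses.map (fun c => (c, true)))
  final.1

-- ===== PORT B =====
def update_clauses_alt (clauses : List (List Int)) (truthvalues : List (Int × Bool)) : Bool :=
  let keys : PySem.Set Int := PySem.Set.ofList (PySem.Dict.ofList truthvalues).keys  -- set(truthvalues)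
  clauses.any (fun clause => !(PySem.Set.isdisjoint keys clause))

-- ===== PRECONDITION & SPEC =====
-- Pre_ excludes exactly the configurations on which A's list.remove raises ValueError
-- (an assigned-True literal together with a duplicated negation in one clause, or a
-- clause containing 0 with 0 assigned False); on a few inputs containing literal 0 this
-- is conservative and also excludes inputs on which A still returns (see cites).
def Pre_update_clauses (clauses : List (List Int)) (truthvalues : List (Int × Bool)) : Prop :=
  (∀ c ∈ clauses, ∀ l ∈ c, (PySem.Dict.ofList truthvalues).get? l = some true →
      PySem.List.count c (-l) < 2) ∧
  (∀ c ∈ clauses, (0 : Int) ∈ c → (PySem.Dict.ofList truthvalues).get? 0 ≠ some false)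
instance (clauses : List (List Int)) (truthvalues : List (Int × Bool)) : Decidable (Pre_update_clauses clauses truthvalues) := by unfold Pre_update_clauses; infer_instance

def pvWitness_update_clauses : List (List Int) × (List (Int × Bool)) :=
  ([[1, -2], [2, 3]], [(1, true), (3, false)])

def Spec_update_clauses (clauses : List (List Int)) (truthvalues : List (Int × Bool)) (out : Bool) : Prop := out = update_clauses_alt clauses truthvalues
instance (clauses : List (List Int)) (truthvalues : List (Int × Bool)) (out : Bool) : Decidable (Spec_update_clauses clauses truthvalues out) := by unfold Spec_update_clauses; infer_instance

-- ===== CLAIM (what is proved, stated in full; the proofs are below) =====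
def Claim_equal_update_clauses : Prop := ∀ (clauses : List (List Int)) (truthvalues : List (Int × Bool)), Dom_update_clauses clauses truthvalues → Pre_update_clauses clauses truthvalues → Spec_update_clauses clauses truthvalues (update_clauses clauses truthvalues)

-- ===== LEMMAS AND PROOFS =====

-- pvLit keeps a `changed = true` flag true
theorem pvLit_mono (tv : PySem.Dict Int Bool) (i : Nat)
    (st : Bool × List (List Int × Bool) × Bool) (l : Int) (h : st.1 = true) :
    (pvLit tv i st l).1 = true := by
  unfold pvLit
  dsimp only
  split_ifs <;> simp_all

theorem foldl_pvLit_mono (tv : PySem.Dict Int Bool) (i : Nat)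
    (keys : List Int) (st : Bool × List (List Int × Bool) × Bool) (h : st.1 = true) :
    (keys.foldl (pvLit tv i) st).1 = true := by
  induction keys generalizing st with
  | nil => exact h
  | cons k ks ih => exact ih _ (pvLit_mono tv i st k h)

-- when the literal is absent (or the clause flagged removed) pvLit is the identity
theorem pvLit_skip (tv : PySem.Dict Int Bool) (i : Nat)
    (st : Bool × List (List Int × Bool) × Bool) (l : Int)
    (h : ((pvContent st.2.1 i).contains l && st.2.2) = false) :
    pvLit tv i st l = st := by
  unfold pvLit
  dsimp only
  rw [if_neg (by rw [h]; exact Bool.false_ne_true)]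

-- entering the branch sets `changed`
theorem pvLit_enter (tv : PySem.Dict Int Bool) (i : Nat)
    (st : Bool × List (List Int × Bool) × Bool) (l : Int)
    (h : ((pvContent st.2.1 i).contains l && st.2.2) = true) :
    (pvLit tv i st l).1 = true := by
  unfold pvLit
  dsimp only
  rw [if_pos h]
  split_ifs <;> simp_all

-- the inner loop: final `changed` is the old one OR "some key occurs in clause i"
theorem inner_eq (tv : PySem.Dict Int Bool) (i : Nat) (keys : List Int) :
    ∀ (st : Bool × List (List Int × Bool) × Bool), st.2.2 = true →
    (keys.foldl (pvLit tv i) st).1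
      = (st.1 || keys.any (fun l => (pvContent st.2.1 i).contains l)) := by
  induction keys with
  | nil => intro st _; simp
  | cons k ks ih =>
    intro st hnr
    simp only [List.foldl_cons, List.any_cons]
    by_cases hk : (pvContent st.2.1 i).contains k = true
    · have h1 : (pvLit tv i st k).1 = true :=
        pvLit_enter tv i st k (by rw [hk, hnr]; rfl)
      rw [foldl_pvLit_mono tv i ks _ h1, hk]
      simp
    · have hk' : (pvContent st.2.1 i).contains k = false := by
        simpa using hk
      rw [pvLit_skip tv i st k (by rw [hk', Bool.false_and]), ih st hnr, hk',
        Bool.false_or]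

-- the inner loop is the identity when no key occurs in clause i
theorem inner_skip (tv : PySem.Dict Int Bool) (i : Nat) (keys : List Int)
    (st : Bool × List (List Int × Bool) × Bool)
    (h : keys.any (fun l => (pvContent st.2.1 i).contains l) = false) :
    keys.foldl (pvLit tv i) st = st := by
  induction keys with
  | nil => rfl
  | cons k ks ih =>
    simp only [List.any_cons, Bool.or_eq_false_iff] at h
    rw [List.foldl_cons, pvLit_skip tv i st k (by rw [h.1, Bool.false_and])]
    exact ih h.2

theorem outer_fold_mono (tv : PySem.Dict Int Bool) (keys : List Int)
    (idxs : List Nat) (acc : Bool × List (List Int × Bool)) (h : acc.1 = true) :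
    (idxs.foldl (fun (acc : Bool × List (List Int × Bool)) i =>
        ((keys.foldl (pvLit tv i) (acc.1, acc.2, true)).1,
         (keys.foldl (pvLit tv i) (acc.1, acc.2, true)).2.1)) acc).1 = true := by
  induction idxs generalizing acc with
  | nil => exact h
  | cons i is ih =>
    exact ih _ (foldl_pvLit_mono tv i keys (acc.1, acc.2, true) (by simpa using h))

-- the outer loop: final `changed` = old one OR "some processed clause holds some key"
theorem outer_eq (tv : PySem.Dict Int Bool) (keys : List Int) (idxs : List Nat) :
    ∀ (acc : Bool × List (List Int × Bool)),
    (idxs.foldl (fun (acc : Bool × List (List Int × Bool)) i =>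
        ((keys.foldl (pvLit tv i) (acc.1, acc.2, true)).1,
         (keys.foldl (pvLit tv i) (acc.1, acc.2, true)).2.1)) acc).1
      = (acc.1 || idxs.any (fun i => keys.any (fun l => (pvContent acc.2 i).contains l))) := by
  induction idxs with
  | nil => intro acc; simp
  | cons i is ih =>
    intro acc
    simp only [List.foldl_cons, List.any_cons]
    by_cases hi : keys.any (fun l => (pvContent acc.2 i).contains l) = true
    · have h1 : (keys.foldl (pvLit tv i) (acc.1, acc.2, true)).1 = true := by
        rw [inner_eq tv i keys (acc.1, acc.2, true) rfl]
        show (acc.1 || _) = true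
        rw [hi, Bool.or_true]
      rw [outer_fold_mono tv keys is _ (by simpa using h1), hi]
      simp
    · have hi' : keys.any (fun l => (pvContent acc.2 i).contains l) = false := by
        simpa using hi
      have hskip : keys.foldl (pvLit tv i) (acc.1, acc.2, true) = (acc.1, acc.2, true) :=
        inner_skip tv i keys (acc.1, acc.2, true) hi'
      rw [hskip]
      rw [ih (acc.1, acc.2)]
      rw [hi', Bool.false_or]

-- indexing bridge: contents of object i in the initial state are clause i
theorem pvContent_init (clauses : List (List Int)) (i : Nat) :
    pvContent (clauses.map (fun c => (c, true))) i = clauses[i]?.getD [] := by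
  simp only [pvContent, List.getElem?_map]
  cases clauses[i]? <;> rfl

-- an index-any over range is an element-any
theorem range_any_getD (xs : List (List Int)) (g : List Int → Bool) :
    (List.range xs.length).any (fun i => g (xs[i]?.getD [])) = xs.any g := by
  rw [Bool.eq_iff_iff]
  simp only [List.any_eq_true, List.mem_range]
  constructor
  · rintro ⟨i, hi, hg⟩
    exact ⟨xs[i], List.getElem_mem hi, by rwa [List.getElem?_eq_getElem hi] at hg⟩
  · rintro ⟨x, hx, hg⟩
    obtain ⟨i, hi, rfl⟩ := List.getElem_of_mem hx
    exact ⟨i, hi, by rwa [List.getElem?_eq_getElem hi]⟩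

-- pointwise bridge to B's set-disjointness test
theorem any_contains_eq_not_isdisjoint (keys : List Int) (c : List Int) :
    keys.any (fun l => c.contains l)
      = !(PySem.Set.isdisjoint (PySem.Set.ofList keys) c) := by
  cases h : PySem.Set.isdisjoint (PySem.Set.ofList keys) c with
  | true =>
    have hall := (PySem.Set.isdisjoint_iff _ _).mp h
    simp only [Bool.not_true]
    apply List.any_eq_false.mpr
    intro l hl
    have : l ∉ c := hall l ((PySem.Set.mem_ofList keys l).mpr hl)
    simpa using this
  | false =>
    have : ¬ (∀ x ∈ PySem.Set.ofList keys, x ∉ c) := by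
      intro hall
      rw [(PySem.Set.isdisjoint_iff _ _).mpr hall] at h
      cases h
    push Not at this
    obtain ⟨l, hl, hlc⟩ := this
    simp only [Bool.not_false]
    exact List.any_eq_true.mpr ⟨l, (PySem.Set.mem_ofList keys l).mp hl, by simpa using hlc⟩

-- ===== VERDICT (by name: the statement is the Claim_ definition above) =====
theorem update_clauses_spec : Claim_equal_update_clauses := by
  intro clauses truthvalues _hdom _hpre
  show update_clauses clauses truthvalues = update_clauses_alt clauses truthvalues
  have hA : update_clauses clauses truthvalues
      = ((List.range clauses.length).foldl
          (fun (acc : Bool × List (List Int × Bool)) i =>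
            (((PySem.Dict.ofList truthvalues).keys.foldl
                (pvLit (PySem.Dict.ofList truthvalues) i) (acc.1, acc.2, true)).1,
             ((PySem.Dict.ofList truthvalues).keys.foldl
                (pvLit (PySem.Dict.ofList truthvalues) i) (acc.1, acc.2, true)).2.1))
          (false, clauses.map (fun c => (c, true)))).1 := rfl
  rw [hA, outer_eq, Bool.false_or]
  have h1 : (fun i => (PySem.Dict.ofList truthvalues).keys.any
        (fun l => (pvContent (clauses.map (fun c => (c, true))) i).contains l))
      = (fun i => (fun c => (PySem.Dict.ofList truthvalues).keys.any
          (fun l => c.contains l)) (clauses[i]?.getD [])) := by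
    funext i; rw [pvContent_init]
  rw [h1, range_any_getD clauses
      (fun c => (PySem.Dict.ofList truthvalues).keys.any (fun l => c.contains l))]
  show _ = clauses.any (fun clause =>
      !(PySem.Set.isdisjoint (PySem.Set.ofList (PySem.Dict.ofList truthvalues).keys) clause))
  simp only [any_contains_eq_not_isdisjoint]
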